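-- pv_equiv track=rewrite | github.com/physicshinzui/mdscope | src/mdscope/analysis/mapping.py | strict_residue_mapping
-- ===== SOURCE A (Python) =====
-- def strict_residue_mapping(
--     mobile_records: list[tuple[int, str, str, int]],
--     ref_records: list[tuple[int, str, str, int]],
-- ) -> list[tuple[int, int]]:
--     ref_by_resid = {(rid, segid): i for i, (rid, _, segid, _) in enumerate(ref_records)}
--     mapping: list[tuple[int, int]] = []
--     for i, (rid, _, segid, _) in enumerate(mobile_records):
--         key = (rid, segid)
--         if key in ref_by_resid:
--             mapping.append((i, ref_by_resid[key]))
--     return mapping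
-- ===== SOURCE B (Python) =====
-- def strict_residue_mapping(
--     mobile_records: list[tuple[int, str, str, int]],
--     ref_records: list[tuple[int, str, str, int]],
-- ) -> list[tuple[int, int]]:
--     # No index: for each mobile record, scan all ref records and keep the
--     # index of the LAST matching (resid, segid), matching A's dict overwrite.
--     mapping: list[tuple[int, int]] = []
--     for i, (rid, _, segid, _) in enumerate(mobile_records):
--         last = None
--         for j, (r2, _, s2, _) in enumerate(ref_records):
--             if r2 == rid and s2 == segid:
--                 last = j
--         if last is not None:
--             mapping.append((i, last))
--     return mapping
-- ===== Notes on version B (the rewrite author's own statement) =====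
-- stated objective: alternative
-- what changed: Replaces the precomputed dict index (hash-map comprehension then O(1) lookups) by a direct nested scan that, for each mobile record, tracks the index of the last matching reference record.
import Mathlib
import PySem

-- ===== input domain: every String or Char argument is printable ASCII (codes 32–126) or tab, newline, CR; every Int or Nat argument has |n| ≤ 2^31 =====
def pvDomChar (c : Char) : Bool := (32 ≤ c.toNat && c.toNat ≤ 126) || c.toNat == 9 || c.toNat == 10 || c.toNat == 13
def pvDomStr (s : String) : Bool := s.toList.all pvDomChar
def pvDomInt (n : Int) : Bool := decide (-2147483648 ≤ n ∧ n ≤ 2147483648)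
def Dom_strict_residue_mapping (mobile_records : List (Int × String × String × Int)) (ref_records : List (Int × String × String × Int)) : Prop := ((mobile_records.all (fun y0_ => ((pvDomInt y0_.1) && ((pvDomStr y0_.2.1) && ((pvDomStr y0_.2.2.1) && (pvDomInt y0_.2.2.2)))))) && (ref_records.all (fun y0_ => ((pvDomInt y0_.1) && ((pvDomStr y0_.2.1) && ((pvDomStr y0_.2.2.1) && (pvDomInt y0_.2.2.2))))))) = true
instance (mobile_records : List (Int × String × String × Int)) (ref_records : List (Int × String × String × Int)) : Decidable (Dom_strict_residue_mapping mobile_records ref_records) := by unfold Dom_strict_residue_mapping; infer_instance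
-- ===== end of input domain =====

-- B replaces A's precomputed dict index by a direct nested scan keeping the
-- last matching reference index (alternative decomposition, same results).

-- ===== PORT A =====
def strict_residue_mapping (mobile_records : List (Int × String × String × Int)) (ref_records : List (Int × String × String × Int)) : List (Int × Int) :=
  let ref_by_resid : PySem.Dict (Int × String) Int :=
    (PySem.List.enumerate ref_records).foldl
      (fun d p => d.insert (p.2.1, p.2.2.2.1) p.1) PySem.Dict.empty
  (PySem.List.enumerate mobile_records).foldl
    (fun mapping p =>
      if ref_by_resid.contains (p.2.1, p.2.2.2.1) then
        mapping ++ [(p.1, ref_by_resid.getD (p.2.1, p.2.2.2.1) 0)]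
      else mapping) []

-- ===== PORT B =====
-- inner scan of B: index of the LAST ref record matching (rid, segid), if any
def smLastMatch (rid : Int) (segid : String) (ref_records : List (Int × String × String × Int)) : Option Int :=
  (PySem.List.enumerate ref_records).foldl
    (fun last p => if p.2.1 == rid && p.2.2.2.1 == segid then some p.1 else last) none

def strict_residue_mapping_alt (mobile_records : List (Int × String × String × Int)) (ref_records : List (Int × String × String × Int)) : List (Int × Int) :=
  (PySem.List.enumerate mobile_records).foldl
    (fun mapping p =>
      match smLastMatch p.2.1 p.2.2.2.1 ref_records with
      | some j => mapping ++ [(p.1, j)]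
      | none => mapping) []

-- ===== PRECONDITION & SPEC =====
def Spec_strict_residue_mapping (mobile_records : List (Int × String × String × Int)) (ref_records : List (Int × String × String × Int)) (out : List (Int × Int)) : Prop := out = strict_residue_mapping_alt mobile_records ref_records
instance (mobile_records : List (Int × String × String × Int)) (ref_records : List (Int × String × String × Int)) (out : List (Int × Int)) : Decidable (Spec_strict_residue_mapping mobile_records ref_records out) := by unfold Spec_strict_residue_mapping; infer_instance

-- ===== CLAIM (what is proved, stated in full; the proofs are below) =====
def Claim_equal_strict_residue_mapping : Prop := ∀ (mobile_records : List (Int × String × String × Int)) (ref_records : List (Int × String × String × Int)), Dom_strict_residue_mapping mobile_records ref_records → Spec_strict_residue_mapping mobile_records ref_records (strict_residue_mapping mobile_records ref_records)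

-- ===== LEMMAS AND PROOFS =====

-- A's dict lookup at (rid, segid) equals B's last-match scan (generalized
-- over the starting dict / accumulator; the enumerated list is arbitrary).
theorem sm_get?_foldl_insert (l : List (Int × (Int × String × String × Int)))
    (d : PySem.Dict (Int × String) Int) (rid : Int) (segid : String) :
    (l.foldl (fun d p => d.insert (p.2.1, p.2.2.2.1) p.1) d).get? (rid, segid)
      = l.foldl (fun last p => if p.2.1 == rid && p.2.2.2.1 == segid then some p.1 else last)
          (d.get? (rid, segid)) := by
  induction l generalizing d with
  | nil => rfl
  | cons p rest ih =>
    simp only [List.foldl_cons]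
    rw [ih]
    congr 1
    rw [PySem.Dict.get?_insert]
    by_cases h : p.2.1 = rid ∧ p.2.2.2.1 = segid
    · simp [h.1, h.2]
    · have : ¬ ((rid, segid) = (p.2.1, p.2.2.2.1)) := by
        intro he; exact h ⟨(Prod.mk.injEq .. ▸ he).1.symm, (Prod.mk.injEq .. ▸ he).2.symm⟩
      rw [if_neg this]
      have : (p.2.1 == rid && p.2.2.2.1 == segid) = false := by
        rcases not_and_or.mp h with h' | h' <;> simp [h']
      rw [this]; rfl

-- the per-record steps of A and B coincide
theorem sm_step_eq (ref_records : List (Int × String × String × Int))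
    (mapping : List (Int × Int)) (p : Int × (Int × String × String × Int)) :
    (if ((PySem.List.enumerate ref_records).foldl
          (fun d q => d.insert (q.2.1, q.2.2.2.1) q.1) PySem.Dict.empty).contains (p.2.1, p.2.2.2.1) then
        mapping ++ [(p.1, ((PySem.List.enumerate ref_records).foldl
          (fun d q => d.insert (q.2.1, q.2.2.2.1) q.1) PySem.Dict.empty).getD (p.2.1, p.2.2.2.1) 0)]
      else mapping)
      = match smLastMatch p.2.1 p.2.2.2.1 ref_records with
        | some j => mapping ++ [(p.1, j)]
        | none => mapping := by
  have hget := sm_get?_foldl_insert (PySem.List.enumerate ref_records) PySem.Dict.empty p.2.1 p.2.2.2.1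
  rw [PySem.Dict.get?_empty] at hget
  have hlm : (((PySem.List.enumerate ref_records).foldl
      (fun d q => d.insert (q.2.1, q.2.2.2.1) q.1) PySem.Dict.empty).get? (p.2.1, p.2.2.2.1))
      = smLastMatch p.2.1 p.2.2.2.1 ref_records := by
    rw [hget]; rfl
  rw [PySem.Dict.contains_eq_isSome_get?, hlm, PySem.Dict.getD_eq_get?_getD, hlm]
  cases smLastMatch p.2.1 p.2.2.2.1 ref_records <;> simp

-- ===== VERDICT (by name: the statement is the Claim_ definition above) =====
theorem strict_residue_mapping_spec : Claim_equal_strict_residue_mapping := by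
  intro mobile_records ref_records _
  unfold Spec_strict_residue_mapping strict_residue_mapping strict_residue_mapping_alt
  apply PySem.List.foldl_congr_mem
  intro mapping p _
  exact sm_step_eq ref_records mapping p
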